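-- pv_equiv track=rewrite | github.com/JetBrains-Research/ai-agents-code-editing | code_editing/data_sources/sources.py | _row_to_relevant_logs
-- ===== SOURCE A (Python) =====
-- from typing import Dict, List, Tuple
--
-- def _row_to_relevant_logs(row: Dict) -> str:
--     logs = "\n".join([step["log"] for step in row["logs"]])
--     error_index = logs.lower().find("error")
--     lines = logs.split("\n")
--     # If no error is found, return the last 7 lines
--     if error_index == -1:
--         return "\n".join(lines[-7:])
--     # If error is found, return the 3 lines before and after the error
--     line_number = logs[:error_index].count("\n")
--     start = max(0, line_number - 3)
--     end = min(len(lines), line_number + 4)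
--     return "\n".join(lines[start:end])
-- ===== SOURCE B (Python) =====
-- def _row_to_relevant_logs(row):
--     logs = "\n".join([step["log"] for step in row["logs"]])
--     lines = logs.split("\n")
--     for i, line in enumerate(lines):
--         if "error" in line.lower():
--             return "\n".join(lines[max(0, i - 3):min(len(lines), i + 4)])
--     return "\n".join(lines[-7:])
-- ===== Notes on version B (the rewrite author's own statement) =====
-- stated objective: idiomatic
-- what changed: B finds the first error by scanning the split lines directly (first line whose lowercase contains 'error') instead of A's character-offset find on the joined lowered string followed by counting newlines before that offset.
import Mathlib
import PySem

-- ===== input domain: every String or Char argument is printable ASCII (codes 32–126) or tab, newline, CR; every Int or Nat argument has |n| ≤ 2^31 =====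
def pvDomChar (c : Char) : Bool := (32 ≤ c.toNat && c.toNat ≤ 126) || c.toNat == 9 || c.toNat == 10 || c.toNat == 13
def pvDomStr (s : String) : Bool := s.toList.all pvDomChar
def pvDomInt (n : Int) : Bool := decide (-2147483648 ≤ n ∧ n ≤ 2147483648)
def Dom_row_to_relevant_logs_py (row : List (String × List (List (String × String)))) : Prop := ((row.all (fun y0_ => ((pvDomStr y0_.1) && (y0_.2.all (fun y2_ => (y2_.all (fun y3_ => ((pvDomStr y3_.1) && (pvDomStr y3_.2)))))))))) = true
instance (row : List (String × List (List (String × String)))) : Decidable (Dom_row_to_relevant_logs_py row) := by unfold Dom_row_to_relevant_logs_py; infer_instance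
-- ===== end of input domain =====

-- B scans the split lines directly for the first line containing "error" (case-insensitive),
-- instead of A's character-offset find on the lowered joined string plus newline counting.

-- ===== PORT A =====
def row_to_relevant_logs_py (row : List (String × List (List (String × String)))) : String :=
  -- row["logs"]: first-match lookup; KeyError (missing key) is excluded by Pre_
  let steps := ((PySem.Dict.mk row).get? "logs").getD []
  -- "\n".join([step["log"] for step in row["logs"]]); step["log"] KeyError excluded by Pre_
  let logs := PySem.Str.join "\n" (steps.map (fun step => ((PySem.Dict.mk step).get? "log").getD ""))
  let error_index := PySem.Str.find (PySem.Str.lower logs) "error"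
  -- logs.split("\n"): sep is nonempty so split? never returns none
  let lines := (PySem.Str.split? logs "\n").getD []
  if error_index == -1 then
    PySem.Str.join "\n" (PySem.List.slice lines (some (-7)) none)
  else
    let line_number : Int := (PySem.Str.count (PySem.Str.slice logs none (some error_index)) "\n" : Int)
    let start := max 0 (line_number - 3)
    let end_ := min (lines.length : Int) (line_number + 4)
    PySem.Str.join "\n" (PySem.List.slice lines (some start) (some end_))

-- ===== PORT B =====
-- the 'for i, line in enumerate(lines): if "error" in line.lower(): …' scan of Source B
def firstErrLine : List String → Option Nat
  | [] => none
  | l :: ls =>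
    if PySem.Str.isIn "error" (PySem.Str.lower l) then some 0
    else (firstErrLine ls).map (· + 1)

def row_to_relevant_logs_py_alt (row : List (String × List (List (String × String)))) : String :=
  let steps := ((PySem.Dict.mk row).get? "logs").getD []
  let logs := PySem.Str.join "\n" (steps.map (fun step => ((PySem.Dict.mk step).get? "log").getD ""))
  let lines := (PySem.Str.split? logs "\n").getD []
  match firstErrLine lines with
  | some i =>
    PySem.Str.join "\n" (PySem.List.slice lines (some (max 0 ((i : Int) - 3))) (some (min (lines.length : Int) ((i : Int) + 4))))
  | none => PySem.Str.join "\n" (PySem.List.slice lines (some (-7)) none)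

-- ===== PRECONDITION & SPEC =====
-- Pre_ excludes exactly the inputs where A raises KeyError: a missing "logs" key, or a step dict without a "log" key.
def Pre_row_to_relevant_logs_py (row : List (String × List (List (String × String)))) : Prop :=
  (((PySem.Dict.mk row).get? "logs").map
    (fun steps => steps.all (fun step => (PySem.Dict.mk step).contains "log"))).getD false = true
instance (row : List (String × List (List (String × String)))) : Decidable (Pre_row_to_relevant_logs_py row) := by unfold Pre_row_to_relevant_logs_py; infer_instance

def pvWitness_row_to_relevant_logs_py : (List (String × List (List (String × String)))) :=
  [("logs", [[("log", "ok line")], [("log", "an Error here")], [("log", "after")]])]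

def Spec_row_to_relevant_logs_py (row : List (String × List (List (String × String)))) (out : String) : Prop := out = row_to_relevant_logs_py_alt row
instance (row : List (String × List (List (String × String)))) (out : String) : Decidable (Spec_row_to_relevant_logs_py row out) := by unfold Spec_row_to_relevant_logs_py; infer_instance

-- ===== CLAIM (what is proved, stated in full; the proofs are below) =====
def Claim_equal_row_to_relevant_logs_py : Prop := ∀ (row : List (String × List (List (String × String)))), Dom_row_to_relevant_logs_py row → Pre_row_to_relevant_logs_py row → Spec_row_to_relevant_logs_py row (row_to_relevant_logs_py row)

-- ===== LEMMAS AND PROOFS =====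

def pvSub : List Char := ['e', 'r', 'r', 'o', 'r']

-- the line decomposition of a char list at '\n' (reference model of logs.split("\n"))
def sp : List Char → List (List Char)
  | [] => [[]]
  | c :: r => if c = '\n' then [] :: sp r else (sp r).modifyHead (c :: ·)

-- index of the first piece containing sub (reference model of B's scan, on lowered char lists)
def firstHit (sub : List Char) : List (List Char) → Option Nat
  | [] => none
  | m :: ms => if PySem.Chars.isIn sub m then some 0 else (firstHit sub ms).map (· + 1)

lemma sp_ne_nil (s : List Char) : sp s ≠ [] := by
  induction s with
  | nil => simp [sp]
  | cons c r ih =>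
    simp only [sp]
    split
    · simp
    · cases h : sp r with
      | nil => exact absurd h ih
      | cons h0 t0 => simp [List.modifyHead]

lemma splitOn_go_sp (l : List Char) : ∀ (fuel : Nat) (cur : List Char) (acc : List (List Char)),
    l.length ≤ fuel →
    PySem.Chars.splitOn.go ['\n'] fuel l cur acc = acc.reverse ++ (sp l).modifyHead (cur.reverse ++ ·) := by
  induction l with
  | nil =>
    intro fuel cur acc _
    cases fuel <;> simp [PySem.Chars.splitOn.go, sp]
  | cons c r ih =>
    intro fuel cur acc hf
    cases fuel with
    | zero => simp at hf
    | succ fuel =>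
      simp only [PySem.Chars.splitOn.go]
      by_cases hc : c = '\n'
      · subst hc
        rw [if_pos (by simp [List.isPrefixOf])]
        have : List.drop (['\n'] : List Char).length ('\n' :: r) = r := by simp
        rw [this, ih fuel [] (cur.reverse :: acc) (by simpa using Nat.le_of_succ_le_succ hf)]
        simp only [sp, if_true]
        cases h : sp r with
        | nil => exact absurd h (sp_ne_nil r)
        | cons h0 t0 => simp [List.modifyHead]
      · rw [if_neg (by simp [List.isPrefixOf]; exact fun h => absurd h.symm hc)]
        rw [ih fuel (c :: cur) acc (by simpa using Nat.le_of_succ_le_succ hf)]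
        simp only [sp, if_neg hc]
        cases h : sp r with
        | nil => exact absurd h (sp_ne_nil r)
        | cons h0 t0 => simp [List.modifyHead]

lemma splitOn_eq_sp (s : List Char) : PySem.Chars.splitOn s ['\n'] = sp s := by
  unfold PySem.Chars.splitOn
  rw [splitOn_go_sp s (s.length + 1) [] [] (Nat.le_succ _)]
  cases h : sp s with
  | nil => exact absurd h (sp_ne_nil s)
  | cons h0 t0 => simp [List.modifyHead]

lemma sp_intercalate (s : List Char) : ['\n'].intercalate (sp s) = s := by
  induction s with
  | nil => simp [sp, List.intercalate]
  | cons c r ih =>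
    simp only [sp]
    by_cases hc : c = '\n'
    · subst hc
      rw [if_pos rfl]
      cases h : sp r with
      | nil => exact absurd h (sp_ne_nil r)
      | cons h0 t0 =>
        rw [h] at ih
        simp [List.intercalate] at ih ⊢
        simpa using ih
    · rw [if_neg hc]
      cases h : sp r with
      | nil => exact absurd h (sp_ne_nil r)
      | cons h0 t0 =>
        rw [h] at ih
        cases t0 with
        | nil => simpa [List.intercalate, List.modifyHead] using congrArg (c :: ·) ih
        | cons t1 ts =>
          simp [List.intercalate, List.modifyHead] at ih ⊢
          simpa using ih

lemma sp_no_newline (s : List Char) : ∀ p ∈ sp s, '\n' ∉ p := by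
  induction s with
  | nil => simp [sp]
  | cons c r ih =>
    simp only [sp]
    by_cases hc : c = '\n'
    · subst hc
      rw [if_pos rfl]
      intro p hp
      rcases List.mem_cons.mp hp with rfl | hp
      · simp
      · exact ih p hp
    · rw [if_neg hc]
      cases h : sp r with
      | nil => exact absurd h (sp_ne_nil r)
      | cons h0 t0 =>
        intro p hp
        rcases List.mem_cons.mp hp with rfl | hp
        · intro hmem
          rcases List.mem_cons.mp hmem with rfl | hmem
          · exact hc rfl
          · exact ih h0 (h ▸ List.mem_cons_self ..) hmem
        · exact ih p (h ▸ List.mem_cons_of_mem _ hp)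

lemma lowerChar_newline_iff (c : Char) : PySem.Chars.lowerChar c = '\n' ↔ c = '\n' := by
  unfold PySem.Chars.lowerChar
  by_cases hu : PySem.Chars.isupper c = true
  · rw [if_pos hu]
    have hb : 65 ≤ c.toNat ∧ c.toNat ≤ 90 := by
      simp only [PySem.Chars.isupper, Bool.and_eq_true, decide_eq_true_eq] at hu
      obtain ⟨h1, h2⟩ := hu
      rw [Char.le_def, UInt32.le_iff_toNat_le] at h1 h2
      exact ⟨h1, h2⟩
    constructor
    · intro he
      exfalso
      have := congrArg Char.toNat he
      rw [Char.toNat_ofNat, if_pos (by constructor; omega)] at this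
      have h10 : ('\n').toNat = 10 := rfl
      omega
    · intro he
      exfalso
      have : c.toNat = 10 := by rw [he]; rfl
      omega
  · rw [if_neg hu]

lemma count_newline_lower (cs : List Char) : (PySem.Chars.lower cs).count '\n' = cs.count '\n' := by
  induction cs with
  | nil => rfl
  | cons c r ih =>
    simp only [PySem.Chars.lower, List.map_cons, List.count_cons] at ih ⊢
    rw [ih]
    congr 1
    by_cases hc : c = '\n'
    · simp [beq_iff_eq, lowerChar_newline_iff, hc]
    · simp [beq_iff_eq, lowerChar_newline_iff, hc]

lemma not_mem_lower_newline (p : List Char) (h : '\n' ∉ p) : '\n' ∉ PySem.Chars.lower p := by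
  unfold PySem.Chars.lower
  intro hm
  rcases List.mem_map.mp hm with ⟨c, hc, he⟩
  exact h ((lowerChar_newline_iff c).mp he ▸ hc)

lemma lower_intercalate (ls : List (List Char)) :
    PySem.Chars.lower (['\n'].intercalate ls) = ['\n'].intercalate (ls.map PySem.Chars.lower) := by
  induction ls with
  | nil => rfl
  | cons a t ih =>
    cases t with
    | nil => simp [List.intercalate, PySem.Chars.lower]
    | cons b t' =>
      simp only [List.intercalate, List.intersperse, List.flatten, List.map_cons] at ih ⊢
      simp [PySem.Chars.lower, List.map_append] at ih ⊢
      constructor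
      · exact (lowerChar_newline_iff '\n').mpr rfl
      · simpa [PySem.Chars.lower] using ih

lemma count_go_singleton (c : Char) (l : List Char) : ∀ (fuel acc : Nat), l.length ≤ fuel →
    PySem.Chars.count.go [c] fuel l acc = acc + l.count c := by
  induction l with
  | nil =>
    intro fuel acc _
    cases fuel <;> simp [PySem.Chars.count.go]
  | cons d r ih =>
    intro fuel acc hf
    cases fuel with
    | zero => simp at hf
    | succ fuel =>
      simp only [PySem.Chars.count.go]
      by_cases hd : c = d
      · subst hd
        rw [if_pos (by simp [List.isPrefixOf])]
        have hdrop : List.drop ([c] : List Char).length (c :: r) = r := by simp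
        rw [hdrop, ih fuel (acc + 1) (by simpa using Nat.le_of_succ_le_succ hf)]
        simp only [List.count_cons, beq_self_eq_true, if_true]
        omega
      · rw [if_neg (by simp [List.isPrefixOf]; exact hd)]
        rw [ih fuel acc (by simpa using Nat.le_of_succ_le_succ hf)]
        have hdc : ¬ (d = c) := fun h => hd h.symm
        simp [hdc]

lemma count_singleton (cs : List Char) (c : Char) : PySem.Chars.count cs [c] = cs.count c := by
  unfold PySem.Chars.count
  rw [if_neg (by simp), count_go_singleton c cs cs.length 0 le_rfl]
  omega

lemma prefix_drop_infix {sub s : List Char} {i : Nat} (h : sub <+: s.drop i) : sub <:+: s := by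
  obtain ⟨suf, hsuf⟩ := h
  exact ⟨s.take i, suf, by rw [List.append_assoc, hsuf, List.take_append_drop]⟩

lemma infix_exists_drop {sub s : List Char} (h : sub <:+: s) : ∃ i, sub <+: s.drop i := by
  obtain ⟨pre, suf, heq⟩ := h
  refine ⟨pre.length, suf, ?_⟩
  rw [← heq]
  simp [List.append_assoc]

lemma find_eq_of (s sub : List Char) (v : Nat) (h1 : sub <+: s.drop v)
    (h2 : ∀ i < v, ¬ sub <+: s.drop i) : PySem.Chars.find s sub = v := by
  have h0 : 0 ≤ PySem.Chars.find s sub :=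
    (PySem.Chars.find_nonneg_iff s sub).mpr (prefix_drop_infix h1)
  obtain ⟨hp, hmin⟩ := PySem.Chars.find_spec h0
  rcases lt_trichotomy (PySem.Chars.find s sub).toNat v with h | h | h
  · exact absurd hp (h2 _ h)
  · omega
  · exact absurd h1 (hmin v h)

lemma prefix_split {sub m t : List Char} (hs : '\n' ∉ sub) (_hm : '\n' ∉ m) (_hne : sub ≠ [])
    {i : Nat} (h : sub <+: (m ++ '\n' :: t).drop i) :
    (i + sub.length ≤ m.length ∧ sub <+: m.drop i) ∨
    (m.length + 1 ≤ i ∧ sub <+: t.drop (i - (m.length + 1))) := by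
  by_cases hi : i ≤ m.length
  · rw [List.drop_append_of_le_length hi] at h
    by_cases hl : sub.length ≤ (m.drop i).length
    · left
      refine ⟨by simp at hl; omega, ?_⟩
      exact List.prefix_of_prefix_length_le h (List.prefix_append _ _) hl
    · exfalso
      have hlen : (m.drop i).length < sub.length := lt_of_not_ge hl
      have hget := h.getElem (i := (m.drop i).length) hlen
      have hnl : (m.drop i ++ '\n' :: t)[(m.drop i).length]'(by simp) = '\n' := by
        simp
      have hget2 : sub[(List.drop i m).length]'hlen = '\n' := hget.trans hnl
      exact hs (hget2 ▸ List.getElem_mem _)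
  · right
    replace hi : m.length < i := lt_of_not_ge hi
    refine ⟨by omega, ?_⟩
    have hd1 : (m ++ '\n' :: t).drop (m.length + (i - m.length)) = ('\n' :: t).drop (i - m.length) :=
      List.drop_length_add_append _
    rw [show m.length + (i - m.length) = i from by omega] at hd1
    rw [show i - m.length = (i - (m.length + 1)) + 1 from by omega, List.drop_succ_cons] at hd1
    rw [hd1] at h
    exact h

lemma intercalate_cons₂ (a b : List Char) (l : List (List Char)) :
    ['\n'].intercalate (a :: b :: l) = a ++ '\n' :: ['\n'].intercalate (b :: l) := by
  simp [List.intercalate]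

lemma scan_find (sub : List Char) (hs : '\n' ∉ sub) (hne : sub ≠ []) :
    ∀ ms : List (List Char), (∀ m ∈ ms, '\n' ∉ m) →
    ((firstHit sub ms = none → PySem.Chars.find (['\n'].intercalate ms) sub = -1) ∧
     (∀ n, firstHit sub ms = some n →
        0 ≤ PySem.Chars.find (['\n'].intercalate ms) sub ∧
        ((['\n'].intercalate ms).take (PySem.Chars.find (['\n'].intercalate ms) sub).toNat).count '\n' = n)) := by
  intro ms
  induction ms with
  | nil =>
    intro _
    refine ⟨fun _ => ?_, fun n hn => by simp [firstHit] at hn⟩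
    rw [PySem.Chars.find_eq_neg_one_iff]
    intro hinf
    simp only [List.intercalate, List.intersperse, List.flatten] at hinf
    exact hne (List.eq_nil_of_infix_nil hinf)
  | cons m ms' ih =>
    intro hnl
    have hm : '\n' ∉ m := hnl m List.mem_cons_self
    have hnl' : ∀ p ∈ ms', '\n' ∉ p := fun p hp => hnl p (List.mem_cons_of_mem _ hp)
    have hinf_of_m : ∀ {i : Nat}, sub <+: m.drop i → sub <:+: m := fun h => prefix_drop_infix h
    cases ms' with
    | nil =>
      have hs1 : ['\n'].intercalate [m] = m := by simp [List.intercalate]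
      rw [hs1]
      constructor
      · intro h0
        simp only [firstHit] at h0
        split at h0
        · cases h0
        · rw [PySem.Chars.find_eq_neg_one_iff]
          intro hin
          rename_i hno
          exact hno ((PySem.Chars.isIn_iff_infix sub m).mpr hin)
      · intro n h0
        simp only [firstHit] at h0
        split at h0
        · injection h0 with h0
          subst h0
          rename_i hyes
          have hin : sub <:+: m := (PySem.Chars.isIn_iff_infix sub m).mp hyes
          refine ⟨(PySem.Chars.find_nonneg_iff m sub).mpr hin, ?_⟩
          rw [List.count_eq_zero]
          intro hmem
          exact hm (List.mem_of_mem_take hmem)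
        · simp only [Option.map_none] at h0
          cases h0
    | cons m2 ms'' =>
      obtain ⟨ih1, ih2⟩ := ih hnl'
      rw [intercalate_cons₂]
      by_cases hinm : PySem.Chars.isIn sub m = true
      · have hin : sub <:+: m := (PySem.Chars.isIn_iff_infix sub m).mp hinm
        have h0le : 0 ≤ PySem.Chars.find m sub := (PySem.Chars.find_nonneg_iff m sub).mpr hin
        obtain ⟨hp, hmin⟩ := PySem.Chars.find_spec h0le
        have he0le : (PySem.Chars.find m sub).toNat ≤ m.length := by
          have := PySem.Chars.find_le_length m sub
          omega
        have hfind : PySem.Chars.find (m ++ '\n' :: ['\n'].intercalate (m2 :: ms'')) sub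
            = ((PySem.Chars.find m sub).toNat : Int) := by
          apply find_eq_of
          · rw [List.drop_append_of_le_length he0le]
            exact hp.trans (List.prefix_append _ _)
          · intro i hi hpre
            rcases prefix_split hs hm hne hpre with ⟨_, hsub⟩ | ⟨hge, _⟩
            · exact hmin i hi hsub
            · omega
        constructor
        · intro h0
          simp only [firstHit, if_pos hinm] at h0
          cases h0
        · intro n h0
          simp only [firstHit, if_pos hinm] at h0
          injection h0 with h0
          subst h0
          refine ⟨by rw [hfind]; exact Int.natCast_nonneg _, ?_⟩
          rw [hfind, Int.toNat_natCast]
          rw [List.take_append_of_le_length he0le, List.count_eq_zero]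
          intro hmem
          exact hm (List.mem_of_mem_take hmem)
      · have hinf_m : ¬ sub <:+: m := fun h => hinm ((PySem.Chars.isIn_iff_infix sub m).mpr h)
        constructor
        · intro h0
          simp only [firstHit, if_neg hinm, Option.map_eq_none_iff] at h0
          have hfind' := ih1 h0
          rw [PySem.Chars.find_eq_neg_one_iff] at hfind' ⊢
          intro hinf
          obtain ⟨i, hpre⟩ := infix_exists_drop hinf
          rcases prefix_split hs hm hne hpre with ⟨_, hsub⟩ | ⟨_, hsub⟩
          · exact hinf_m (hinf_of_m hsub)
          · exact hfind' (prefix_drop_infix hsub)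
        · intro n h0
          simp only [firstHit, if_neg hinm, Option.map_eq_some_iff] at h0
          obtain ⟨n', hn', rfl⟩ := h0
          obtain ⟨h0le', hcount⟩ := ih2 n' hn'
          obtain ⟨hp', hmin'⟩ := PySem.Chars.find_spec h0le'
          have hfind : PySem.Chars.find (m ++ '\n' :: ['\n'].intercalate (m2 :: ms'')) sub
              = ((m.length + 1 + (PySem.Chars.find (['\n'].intercalate (m2 :: ms'')) sub).toNat : Nat) : Int) := by
            apply find_eq_of
            · have hd1 : (m ++ '\n' :: ['\n'].intercalate (m2 :: ms'')).drop
                  (m.length + (1 + (PySem.Chars.find (['\n'].intercalate (m2 :: ms'')) sub).toNat))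
                  = ('\n' :: ['\n'].intercalate (m2 :: ms'')).drop
                  (1 + (PySem.Chars.find (['\n'].intercalate (m2 :: ms'')) sub).toNat) :=
                List.drop_length_add_append _
              rw [show m.length + 1 + (PySem.Chars.find (['\n'].intercalate (m2 :: ms'')) sub).toNat
                  = m.length + (1 + (PySem.Chars.find (['\n'].intercalate (m2 :: ms'')) sub).toNat) from by omega, hd1]
              rw [Nat.add_comm 1 _, List.drop_succ_cons]
              exact hp'
            · intro i hi hpre
              rcases prefix_split hs hm hne hpre with ⟨_, hsub⟩ | ⟨hge, hsub⟩
              · exact hinf_m (hinf_of_m hsub)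
              · exact hmin' (i - (m.length + 1)) (by omega) hsub
          refine ⟨by rw [hfind]; exact Int.natCast_nonneg _, ?_⟩
          rw [hfind, Int.toNat_natCast]
          have ht1 : (m ++ '\n' :: ['\n'].intercalate (m2 :: ms'')).take
              (m.length + (1 + (PySem.Chars.find (['\n'].intercalate (m2 :: ms'')) sub).toNat))
              = m ++ ('\n' :: ['\n'].intercalate (m2 :: ms'')).take
              (1 + (PySem.Chars.find (['\n'].intercalate (m2 :: ms'')) sub).toNat) :=
            List.take_length_add_append _
          rw [show m.length + 1 + (PySem.Chars.find (['\n'].intercalate (m2 :: ms'')) sub).toNat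
              = m.length + (1 + (PySem.Chars.find (['\n'].intercalate (m2 :: ms'')) sub).toNat) from by omega, ht1]
          rw [Nat.add_comm 1 _, List.take_succ_cons, List.count_append, List.count_cons]
          rw [List.count_eq_zero.mpr hm, hcount]
          simp

-- the two tails after the shared 'logs' computation (let-free restatements of the ports' tails)
def aTail (logs : String) : String :=
  if PySem.Str.find (PySem.Str.lower logs) "error" == -1 then
    PySem.Str.join "\n" (PySem.List.slice ((PySem.Str.split? logs "\n").getD []) (some (-7)) none)
  else
    PySem.Str.join "\n" (PySem.List.slice ((PySem.Str.split? logs "\n").getD [])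
      (some (max 0 ((PySem.Str.count (PySem.Str.slice logs none (some (PySem.Str.find (PySem.Str.lower logs) "error"))) "\n" : Int) - 3)))
      (some (min ((((PySem.Str.split? logs "\n").getD []).length : Int))
        ((PySem.Str.count (PySem.Str.slice logs none (some (PySem.Str.find (PySem.Str.lower logs) "error"))) "\n" : Int) + 4))))

def bTail (logs : String) : String :=
  match firstErrLine ((PySem.Str.split? logs "\n").getD []) with
  | some i =>
    PySem.Str.join "\n" (PySem.List.slice ((PySem.Str.split? logs "\n").getD [])
      (some (max 0 ((i : Int) - 3)))
      (some (min ((((PySem.Str.split? logs "\n").getD []).length : Int)) ((i : Int) + 4))))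
  | none => PySem.Str.join "\n" (PySem.List.slice ((PySem.Str.split? logs "\n").getD []) (some (-7)) none)

lemma firstErrLine_eq (lines : List String) :
    firstErrLine lines = firstHit pvSub (lines.map (fun l => PySem.Chars.lower l.toList)) := by
  induction lines with
  | nil => rfl
  | cons l ls ih =>
    simp only [firstErrLine, firstHit, List.map_cons]
    rw [PySem.Str.isIn_eq, PySem.Str.toList_lower, show ("error" : String).toList = pvSub from by decide, ih]


lemma tails_eq (logs : String) : aTail logs = bTail logs := by
  have hsplit : PySem.Str.split? logs "\n" = some ((sp logs.toList).map String.ofList) := by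
    show Option.map _ (PySem.Chars.split? logs.toList ("\n" : String).toList) = _
    rw [show ("\n" : String).toList = ['\n'] from by decide]
    unfold PySem.Chars.split?
    rw [if_neg (by simp), splitOn_eq_sp]
    rfl
  have hlines : (PySem.Str.split? logs "\n").getD [] = (sp logs.toList).map String.ofList := by
    rw [hsplit]; rfl
  have hmsnl : ∀ m ∈ (sp logs.toList).map PySem.Chars.lower, '\n' ∉ m := by
    intro m hm
    rcases List.mem_map.mp hm with ⟨p, hp, rfl⟩
    exact not_mem_lower_newline p (sp_no_newline _ p hp)
  have hS : PySem.Chars.lower logs.toList = ['\n'].intercalate ((sp logs.toList).map PySem.Chars.lower) := by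
    conv_lhs => rw [← sp_intercalate logs.toList]
    rw [lower_intercalate]
  have hfind : PySem.Str.find (PySem.Str.lower logs) "error"
      = PySem.Chars.find (['\n'].intercalate ((sp logs.toList).map PySem.Chars.lower)) pvSub := by
    rw [PySem.Str.find_eq, PySem.Str.toList_lower, hS, show ("error" : String).toList = pvSub from by decide]
  have hfel : firstErrLine ((sp logs.toList).map String.ofList)
      = firstHit pvSub ((sp logs.toList).map PySem.Chars.lower) := by
    rw [firstErrLine_eq, List.map_map]
    congr 1
    apply List.map_congr_left
    intro p _
    simp
  obtain ⟨sf1, sf2⟩ := scan_find pvSub (by decide) (by decide) _ hmsnl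
  unfold aTail bTail
  rw [hlines, hfel, hfind]
  cases hcase : firstHit pvSub ((sp logs.toList).map PySem.Chars.lower) with
  | none =>
    rw [sf1 hcase, if_pos (by decide)]
  | some n =>
    obtain ⟨hpos, hcnt⟩ := sf2 n hcase
    rw [if_neg (by simp only [beq_iff_eq]; omega)]
    have hcount : (PySem.Str.count (PySem.Str.slice logs none
        (some (PySem.Chars.find (['\n'].intercalate ((sp logs.toList).map PySem.Chars.lower)) pvSub))) "\n" : Int) = (n : Int) := by
      apply Nat.cast_inj.mpr
      rw [PySem.Str.count_eq, PySem.Str.toList_slice, show ("\n" : String).toList = ['\n'] from by decide]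
      rw [PySem.Chars.slice_eq_listSlice, PySem.List.slice_to _ hpos, count_singleton]
      have h1 : (logs.toList.take (PySem.Chars.find (['\n'].intercalate ((sp logs.toList).map PySem.Chars.lower)) pvSub).toNat).count '\n'
          = ((PySem.Chars.lower logs.toList).take (PySem.Chars.find (['\n'].intercalate ((sp logs.toList).map PySem.Chars.lower)) pvSub).toNat).count '\n' := by
        unfold PySem.Chars.lower
        rw [← List.map_take]
        exact (count_newline_lower _).symm
      rw [h1, hS]
      exact hcnt
    rw [hcount]

lemma ports_eq (row : List (String × List (List (String × String)))) :
    row_to_relevant_logs_py row = row_to_relevant_logs_py_alt row := by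
  have ha : row_to_relevant_logs_py row = aTail (PySem.Str.join "\n"
      ((((PySem.Dict.mk row).get? "logs").getD []).map (fun step => ((PySem.Dict.mk step).get? "log").getD ""))) := rfl
  have hb : row_to_relevant_logs_py_alt row = bTail (PySem.Str.join "\n"
      ((((PySem.Dict.mk row).get? "logs").getD []).map (fun step => ((PySem.Dict.mk step).get? "log").getD ""))) := rfl
  rw [ha, hb, tails_eq]

-- ===== VERDICT (by name: the statement is the Claim_ definition above) =====
theorem row_to_relevant_logs_py_spec : Claim_equal_row_to_relevant_logs_py := by
  intro row _ _
  exact ports_eq row
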